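-- pv_equiv track=rewrite | github.com/NikitaF99/AdvancedAI_Assi2 | src/evaluation.py | map_domain
-- ===== SOURCE A (Python) =====
-- def map_domain(domain):
--     d = str(domain).lower()
--
--     if any(k in d for k in [
--         "software", "data", "ai", "machine learning", "tech",
--         "it", "robotics", "virtual reality", "developer"
--     ]):
--         return "Technology"
--     elif any(k in d for k in [
--         "business", "marketing", "finance", "manager",
--         "entrepreneur"
--     ]):
--         return "Business"
--     elif any(k in d for k in [
--         "education", "research", "scientist"
--     ]):
--         return "Education"
--     elif any(k in d for k in [
--         "social", "community", "pharmacist"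
--     ]):
--         return "Social"
--     elif any(k in d for k in [
--         "design", "art", "curator"
--     ]):
--         return "Creative"
--     else:
--         return "Other"
-- ===== SOURCE B (Python) =====
-- # B: instead of an if/elif chain per category, flatten all keywords into one
-- # keyword -> priority dict, take the minimum priority among matching keywords
-- # in a single pass, and map that minimum back to a category name.
-- KEYWORD_PRIORITY = {
--     "software": 0, "data": 0, "ai": 0, "machine learning": 0, "tech": 0,
--     "it": 0, "robotics": 0, "virtual reality": 0, "developer": 0,
--     "business": 1, "marketing": 1, "finance": 1, "manager": 1,
--     "entrepreneur": 1,
--     "education": 2, "research": 2, "scientist": 2,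
--     "social": 3, "community": 3, "pharmacist": 3,
--     "design": 4, "art": 4, "curator": 4,
-- }
-- CATEGORIES = ["Technology", "Business", "Education", "Social", "Creative", "Other"]
--
-- def map_domain(domain):
--     d = str(domain).lower()
--     best = 5
--     for k, p in KEYWORD_PRIORITY.items():
--         if p < best and k in d:
--             best = p
--     return CATEGORIES[best]
-- ===== Notes on version B (the rewrite author's own statement) =====
-- stated objective: alternative
-- what changed: Replaces the five-branch if/elif-of-any() chain with one flat keyword->priority dict scanned in a single pass keeping the minimum priority of any matching keyword, then indexing that minimum into a category table.
import Mathlib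
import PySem

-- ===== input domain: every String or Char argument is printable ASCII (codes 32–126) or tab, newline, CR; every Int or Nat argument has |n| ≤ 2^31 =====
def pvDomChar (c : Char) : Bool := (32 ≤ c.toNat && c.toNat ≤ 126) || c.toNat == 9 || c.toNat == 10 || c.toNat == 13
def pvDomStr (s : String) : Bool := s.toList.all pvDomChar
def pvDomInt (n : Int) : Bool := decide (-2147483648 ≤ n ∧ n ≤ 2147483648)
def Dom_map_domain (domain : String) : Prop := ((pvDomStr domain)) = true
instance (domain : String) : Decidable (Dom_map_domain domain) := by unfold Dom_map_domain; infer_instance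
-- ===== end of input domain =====

-- B replaces A's per-category if/elif chain by a single pass over a flat keyword->priority
-- dict keeping the minimum matching priority, then indexing a category table (alternative; same cost).

-- ===== PORT A =====
def map_domain (domain : String) : String :=
  let d := PySem.Str.lower domain
  if (["software", "data", "ai", "machine learning", "tech",
       "it", "robotics", "virtual reality", "developer"] : List String).any
      (fun k => PySem.Str.isIn k d) then "Technology"
  else if (["business", "marketing", "finance", "manager",
            "entrepreneur"] : List String).any (fun k => PySem.Str.isIn k d) then "Business"
  else if (["education", "research", "scientist"] : List String).any
      (fun k => PySem.Str.isIn k d) then "Education"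
  else if (["social", "community", "pharmacist"] : List String).any
      (fun k => PySem.Str.isIn k d) then "Social"
  else if (["design", "art", "curator"] : List String).any
      (fun k => PySem.Str.isIn k d) then "Creative"
  else "Other"

-- ===== PORT B =====
-- KEYWORD_PRIORITY as an insertion-ordered association list (all keys distinct)
def pvKeyPrio : List (String × Nat) :=
  [("software", 0), ("data", 0), ("ai", 0), ("machine learning", 0), ("tech", 0),
   ("it", 0), ("robotics", 0), ("virtual reality", 0), ("developer", 0),
   ("business", 1), ("marketing", 1), ("finance", 1), ("manager", 1),
   ("entrepreneur", 1),
   ("education", 2), ("research", 2), ("scientist", 2),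
   ("social", 3), ("community", 3), ("pharmacist", 3),
   ("design", 4), ("art", 4), ("curator", 4)]

def pvCats : List String :=
  ["Technology", "Business", "Education", "Social", "Creative", "Other"]

def map_domain_alt (domain : String) : String :=
  let d := PySem.Str.lower domain
  let best := pvKeyPrio.foldl
    (fun best kp => if kp.2 < best ∧ PySem.Str.isIn kp.1 d then kp.2 else best) 5
  pvCats.getD best "Other"   -- best is always in 0..5, so CATEGORIES[best] never raises

-- ===== PRECONDITION & SPEC =====
def Spec_map_domain (domain : String) (out : String) : Prop := out = map_domain_alt domain
instance (domain : String) (out : String) : Decidable (Spec_map_domain domain out) := by unfold Spec_map_domain; infer_instance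

-- ===== CLAIM (what is proved, stated in full; the proofs are below) =====
def Claim_equal_map_domain : Prop := ∀ (domain : String), Dom_map_domain domain → Spec_map_domain domain (map_domain domain)

-- ===== LEMMAS AND PROOFS =====

-- folding one constant-priority group of keywords updates the running minimum exactly
-- when the group has a match and can improve it (f abstracts the substring test)
lemma pvFold_group (f : String → Bool) (p : Nat) (ks : List String) (acc : Nat) :
    List.foldl (fun best kp => if kp.2 < best ∧ f kp.1 then kp.2 else best) acc
        (ks.map (fun k => (k, p)))
      = if p < acc ∧ ks.any f then p else acc := by
  induction ks generalizing acc with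
  | nil => simp
  | cons k ks ih =>
    simp only [List.map_cons, List.foldl_cons, List.any_cons, ih]
    by_cases hk : f k = true
    · by_cases hp : p < acc
      · simp [hk, hp]
      · simp [hk, hp]
    · simp [hk]

-- the flat dict is the concatenation of the five constant-priority groups
lemma pvKeyPrio_eq :
    pvKeyPrio =
      (["software", "data", "ai", "machine learning", "tech",
        "it", "robotics", "virtual reality", "developer"].map (fun k => (k, 0)))
      ++ (["business", "marketing", "finance", "manager", "entrepreneur"].map (fun k => (k, 1)))
      ++ (["education", "research", "scientist"].map (fun k => (k, 2)))
      ++ (["social", "community", "pharmacist"].map (fun k => (k, 3)))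
      ++ (["design", "art", "curator"].map (fun k => (k, 4))) := by
  rfl

-- ===== VERDICT (by name: the statement is the Claim_ definition above) =====
theorem map_domain_spec : Claim_equal_map_domain := by
  intro domain _
  unfold Spec_map_domain map_domain map_domain_alt
  set d := PySem.Str.lower domain with hd
  rw [pvKeyPrio_eq]
  simp only [List.foldl_append, pvFold_group (fun k => PySem.Str.isIn k d)]
  by_cases h0 : (["software", "data", "ai", "machine learning", "tech",
       "it", "robotics", "virtual reality", "developer"] : List String).any
      (fun k => PySem.Str.isIn k d) = true <;>
  by_cases h1 : (["business", "marketing", "finance", "manager",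
            "entrepreneur"] : List String).any (fun k => PySem.Str.isIn k d) = true <;>
  by_cases h2 : (["education", "research", "scientist"] : List String).any
      (fun k => PySem.Str.isIn k d) = true <;>
  by_cases h3 : (["social", "community", "pharmacist"] : List String).any
      (fun k => PySem.Str.isIn k d) = true <;>
  by_cases h4 : (["design", "art", "curator"] : List String).any
      (fun k => PySem.Str.isIn k d) = true <;>
  simp only [h0, h1, h2, h3, h4] <;> norm_num [pvCats]
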